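-- pv_equiv track=rewrite | github.com/andreforks/gradescope-mcp | src/gradescope_mcp/tools/answer_groups.py | _partition_group_submissions
-- ===== SOURCE A (Python) =====
-- from typing import Any
--
-- def _partition_group_submissions(
--     submissions: list[dict[str, Any]],
--     group_id: str,
-- ) -> tuple[list[dict[str, Any]], list[dict[str, Any]]]:
--     """Split a group's members into confirmed and inferred submissions."""
--     confirmed = [
--         s for s in submissions
--         if str(s.get("confirmed_group_id")) == str(group_id)
--     ]
--     inferred = [
--         s for s in submissions
--         if str(s.get("confirmed_group_id")) != str(group_id)
--         and str(s.get("unconfirmed_group_id")) == str(group_id)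
--     ]
--     return confirmed, inferred
-- ===== SOURCE B (Python) =====
-- from typing import Any
--
-- def _partition_group_submissions(
--     submissions: list[dict[str, Any]],
--     group_id: str,
-- ) -> tuple[list[dict[str, Any]], list[dict[str, Any]]]:
--     """Single classifying pass: route each submission to confirmed or inferred."""
--     gid = str(group_id)
--     confirmed: list[dict[str, Any]] = []
--     inferred: list[dict[str, Any]] = []
--     for s in submissions:
--         if str(s.get("confirmed_group_id")) == gid:
--             confirmed.append(s)
--         elif str(s.get("unconfirmed_group_id")) == gid:
--             inferred.append(s)
--     return confirmed, inferred
-- ===== Notes on version B (the rewrite author's own statement) =====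
-- stated objective: alternative
-- what changed: Two full filtering scans (the second re-testing the confirmed predicate) are replaced by one classifying pass that maintains both result lists with an if/elif.
import Mathlib
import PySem

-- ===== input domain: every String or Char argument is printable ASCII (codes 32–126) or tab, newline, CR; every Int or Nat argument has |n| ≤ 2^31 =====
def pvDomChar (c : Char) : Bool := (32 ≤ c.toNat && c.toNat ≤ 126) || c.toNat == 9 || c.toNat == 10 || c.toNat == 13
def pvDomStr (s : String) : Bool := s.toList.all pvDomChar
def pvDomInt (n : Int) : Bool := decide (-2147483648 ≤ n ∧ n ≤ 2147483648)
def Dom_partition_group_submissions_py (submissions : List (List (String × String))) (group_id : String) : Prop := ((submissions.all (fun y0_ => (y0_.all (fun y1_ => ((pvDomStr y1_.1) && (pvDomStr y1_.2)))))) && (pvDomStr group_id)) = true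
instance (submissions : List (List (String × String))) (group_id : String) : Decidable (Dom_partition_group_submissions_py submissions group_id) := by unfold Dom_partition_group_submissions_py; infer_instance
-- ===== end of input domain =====

-- B replaces the two filtering scans with one classifying if/elif pass keeping two accumulator lists (alternative decomposition, same cost class).
-- ===== PORT A =====
def pvStrGetA (s : List (String × String)) (k : String) : String :=
  match s.find? (fun p => p.1 == k) with
  | some p => p.2
  | none => "None"

def partition_group_submissions_py (submissions : List (List (String × String))) (group_id : String) : (List (List (String × String))) × (List (List (String × String))) :=
  let confirmed := submissions.filter (fun s => pvStrGetA s "confirmed_group_id" == group_id)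
  let inferred := submissions.filter (fun s =>
    (pvStrGetA s "confirmed_group_id" != group_id) && (pvStrGetA s "unconfirmed_group_id" == group_id))
  (confirmed, inferred)

-- ===== PORT B =====
def pvStrGetB (s : List (String × String)) (k : String) : String :=
  (s.lookup k).elim "None" id

def partition_group_submissions_py_alt (submissions : List (List (String × String))) (group_id : String) : (List (List (String × String))) × (List (List (String × String))) :=
  submissions.foldl
    (fun acc s =>
      if pvStrGetB s "confirmed_group_id" == group_id then (acc.1 ++ [s], acc.2)
      else if pvStrGetB s "unconfirmed_group_id" == group_id then (acc.1, acc.2 ++ [s])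
      else acc)
    ([], [])

-- ===== PRECONDITION & SPEC =====
def Spec_partition_group_submissions_py (submissions : List (List (String × String))) (group_id : String) (out : (List (List (String × String))) × (List (List (String × String)))) : Prop := out = partition_group_submissions_py_alt submissions group_id
instance (submissions : List (List (String × String))) (group_id : String) (out : (List (List (String × String))) × (List (List (String × String)))) : Decidable (Spec_partition_group_submissions_py submissions group_id out) := by unfold Spec_partition_group_submissions_py; infer_instance

-- ===== CLAIM (what is proved, stated in full; the proofs are below) =====
def Claim_equal_partition_group_submissions_py : Prop := ∀ (submissions : List (List (String × String))) (group_id : String), Dom_partition_group_submissions_py submissions group_id → Spec_partition_group_submissions_py submissions group_id (partition_group_submissions_py submissions group_id)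

-- ===== LEMMAS AND PROOFS =====
lemma pvStrGet_eq (s : List (String × String)) (k : String) : pvStrGetA s k = pvStrGetB s k := by
  induction s with
  | nil => rfl
  | cons p t ih =>
    obtain ⟨a, b⟩ := p
    by_cases h : a = k
    · simp [pvStrGetA, pvStrGetB, List.find?, List.lookup, h]
    · simp only [pvStrGetA, pvStrGetB, List.find?, List.lookup] at *
      rw [show ((a, b).1 == k) = false by simpa using h,
          show (k == a) = false by simpa using (Ne.symm h)]
      exact ih

lemma pvFold_inv (gid : String) (l : List (List (String × String))) :
    ∀ (c i : List (List (String × String))),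
    l.foldl
      (fun acc s =>
        if pvStrGetB s "confirmed_group_id" == gid then (acc.1 ++ [s], acc.2)
        else if pvStrGetB s "unconfirmed_group_id" == gid then (acc.1, acc.2 ++ [s])
        else acc)
      (c, i)
    = (c ++ l.filter (fun s => pvStrGetB s "confirmed_group_id" == gid),
       i ++ l.filter (fun s =>
         (pvStrGetB s "confirmed_group_id" != gid) && (pvStrGetB s "unconfirmed_group_id" == gid))) := by
  induction l with
  | nil => simp
  | cons s t ih =>
    intro c i
    rw [List.foldl_cons, List.filter_cons, List.filter_cons]
    by_cases h1 : (pvStrGetB s "confirmed_group_id" == gid) = true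
    · rw [if_pos h1, if_pos h1, if_neg (by simp [bne, h1]), ih]
      simp
    · rw [if_neg h1, if_neg h1]
      by_cases h2 : (pvStrGetB s "unconfirmed_group_id" == gid) = true
      · rw [if_pos h2, if_pos (by simp [bne, h1, h2]), ih]
        simp
      · rw [if_neg h2, if_neg (by simp [h2]), ih]

-- ===== VERDICT (by name: the statement is the Claim_ definition above) =====
theorem partition_group_submissions_py_spec : Claim_equal_partition_group_submissions_py := by
  intro submissions group_id _
  unfold Spec_partition_group_submissions_py partition_group_submissions_py partition_group_submissions_py_alt
  simp only [pvStrGet_eq, pvFold_inv, List.nil_append]
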